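-- pv_equiv track=rewrite | github.com/kavnwang/adaptive-attention | experiments/utils/scripts/fix_and_analyze_json.py | count_repeating_digits_with_diff_values
-- ===== SOURCE A (Python) =====
-- from collections import defaultdict
--
-- def count_repeating_digits_with_diff_values(key, value):
--     """
--     Count the number of repeating digits in the key where the corresponding
--     digits in the value are different.
--
--     Example:
--     - key="e00", value="e89" -> 2 (both 0s in key correspond to different digits 8,9 in value)
--     - key="e12", value="e12" -> 0 (no repeating digits in key)
--     - key="e11", value="e11" -> 0 (repeating digits but values are same)
--     - key="e11", value="e89" -> 2 (both 1s in key correspond to different digits 8,9 in value)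
--     """
--     # Extract just the digit parts (assuming format like "eXXXXXX")
--     key_digits = "".join(c for c in key if c.isdigit())
--     value_digits = "".join(c for c in value if c.isdigit())
--
--     if len(key_digits) != len(value_digits):
--         return 0
--
--     # Count occurrences of each digit in key
--     digit_positions = defaultdict(list)
--     for i, digit in enumerate(key_digits):
--         digit_positions[digit].append(i)
--
--     # Count repeating digits where corresponding value digits differ
--     count = 0
--     for digit, positions in digit_positions.items():
--         if len(positions) > 1:  # This digit repeats in the key
--             # Check if all corresponding value digits are different from key digit
--             for pos in positions:
--                 if key_digits[pos] != value_digits[pos]: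
--                     count += 1
--
--     return count
-- ===== SOURCE B (Python) =====
-- def count_repeating_digits_with_diff_values(key, value):
--     key_digits = "".join(c for c in key if c.isdigit())
--     value_digits = "".join(c for c in value if c.isdigit())
--
--     if len(key_digits) != len(value_digits):
--         return 0
--
--     # frequency of each digit in the key (no position lists)
--     counts = {}
--     for c in key_digits:
--         counts[c] = counts.get(c, 0) + 1
--
--     # single flat pass over aligned digit pairs
--     total = 0
--     for k_d, v_d in zip(key_digits, value_digits):
--         if counts[k_d] > 1 and k_d != v_d:
--             total += 1
--     return total
-- ===== Notes on version B (the rewrite author's own statement) =====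
-- stated objective: simpler
-- what changed: A groups key-digit positions into a defaultdict of position lists and then runs a nested loop over the grouped lists; B keeps only a per-digit frequency dict and does one flat pass over the zipped digit pairs, counting pairs whose key digit is repeated and differs from the value digit.
import Mathlib
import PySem

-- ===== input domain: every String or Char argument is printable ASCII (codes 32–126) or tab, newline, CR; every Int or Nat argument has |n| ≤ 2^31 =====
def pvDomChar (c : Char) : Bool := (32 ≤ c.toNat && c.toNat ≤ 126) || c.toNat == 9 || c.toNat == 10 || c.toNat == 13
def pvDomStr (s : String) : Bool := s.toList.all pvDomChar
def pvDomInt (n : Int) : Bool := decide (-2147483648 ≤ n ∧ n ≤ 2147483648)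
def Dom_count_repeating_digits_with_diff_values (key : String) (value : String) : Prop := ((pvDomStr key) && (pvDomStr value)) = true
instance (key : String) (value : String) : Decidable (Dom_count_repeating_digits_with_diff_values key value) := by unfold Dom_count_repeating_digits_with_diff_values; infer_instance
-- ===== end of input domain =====

-- B replaces A's dict of position lists and grouped nested loops by a digit-frequency counter
-- plus one flat pass over the aligned digit pairs (objective: simpler).

-- ===== PORT A =====
def count_repeating_digits_with_diff_values (key : String) (value : String) : Int :=
  let kd := key.toList.filter (fun c => PySem.Chars.isdigit c)
  let vd := value.toList.filter (fun c => PySem.Chars.isdigit c)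
  if kd.length ≠ vd.length then 0
  else
    let dp := (PySem.List.enumerate kd).foldl
      (fun d p => d.modify p.2 [] (fun ps => ps ++ [p.1])) PySem.Dict.empty
    dp.items.foldl (fun count it =>
      if it.2.length > 1 then
        it.2.foldl (fun cnt pos =>
          if PySem.List.pyGetD kd pos ' ' ≠ PySem.List.pyGetD vd pos ' ' then cnt + 1 else cnt)
          count
      else count) 0

-- ===== PORT B =====
def count_repeating_digits_with_diff_values_alt (key : String) (value : String) : Int :=
  let kd := key.toList.filter (fun c => PySem.Chars.isdigit c)
  let vd := value.toList.filter (fun c => PySem.Chars.isdigit c)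
  if kd.length ≠ vd.length then 0
  else
    let counts : PySem.Dict Char Int := kd.foldl (fun d c => d.insert c (d.getD c 0 + 1)) PySem.Dict.empty
    (kd.zip vd).foldl (fun t p => if counts.getD p.1 0 > 1 ∧ p.1 ≠ p.2 then t + 1 else t) 0

-- ===== PRECONDITION & SPEC =====
def Spec_count_repeating_digits_with_diff_values (key : String) (value : String) (out : Int) : Prop := out = count_repeating_digits_with_diff_values_alt key value
instance (key : String) (value : String) (out : Int) : Decidable (Spec_count_repeating_digits_with_diff_values key value out) := by unfold Spec_count_repeating_digits_with_diff_values; infer_instance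

-- ===== CLAIM (what is proved, stated in full; the proofs are below) =====
def Claim_equal_count_repeating_digits_with_diff_values : Prop := ∀ (key : String) (value : String), Dom_count_repeating_digits_with_diff_values key value → Spec_count_repeating_digits_with_diff_values key value (count_repeating_digits_with_diff_values key value)

-- ===== LEMMAS AND PROOFS =====

theorem pv_sum_if_not_mem {κ : Type} [DecidableEq κ] (S : List κ) (x : κ) (w : Nat)
    (t : κ → Nat) (hx : x ∉ S) :
    (S.map (fun c => (if x = c then w else 0) + t c)).sum = (S.map t).sum := by
  induction S with
  | nil => simp
  | cons c S ih =>
    simp only [List.mem_cons, not_or] at hx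
    simp [if_neg hx.1, ih hx.2]

theorem pv_sum_if_single {κ : Type} [DecidableEq κ] (S : List κ) (x : κ) (w : Nat)
    (t : κ → Nat) (hnd : S.Nodup) (hx : x ∈ S) :
    (S.map (fun c => (if x = c then w else 0) + t c)).sum = w + (S.map t).sum := by
  induction S with
  | nil => simp at hx
  | cons c S ih =>
    rcases List.nodup_cons.mp hnd with ⟨hc, hnd'⟩
    rcases List.mem_cons.mp hx with h | h
    · subst h
      simp [pv_sum_if_not_mem S x w t hc, Nat.add_assoc]
    · have hne : x ≠ c := fun he => hc (he ▸ h)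
      simp [if_neg hne, ih hnd' h]
      omega

theorem pv_partition_countP {α κ : Type} [BEq κ] [LawfulBEq κ] [DecidableEq κ]
    (key : α → κ) (P : α → Bool) (l : List α) (S : List κ)
    (hnd : S.Nodup) (hcov : ∀ x ∈ l, key x ∈ S) :
    (S.map (fun c => (l.filter (fun x => key x == c)).countP P)).sum = l.countP P := by
  induction l with
  | nil => simp
  | cons a t ih =>
    have hc : key a ∈ S := hcov a (List.mem_cons_self)
    have hcov' : ∀ x ∈ t, key x ∈ S := fun x hx => hcov x (List.mem_cons_of_mem a hx)
    have hterm : (fun c => ((a :: t).filter (fun x => key x == c)).countP P)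
        = fun c => (if key a = c then (if P a then 1 else 0) else 0)
            + (t.filter (fun x => key x == c)).countP P := by
      funext c
      by_cases h : key a = c
      · simp [h, List.countP_cons]
        omega
      · have : (key a == c) = false := beq_eq_false_iff_ne.mpr h
        simp [this, h]
    rw [hterm, pv_sum_if_single S (key a) _ _ hnd hc, ih hcov', List.countP_cons]
    omega

theorem pv_enumerate_map {α β : Type} (f : α → β) (l : List α) (s : Int) :
    PySem.List.enumerate (l.map f) s = (PySem.List.enumerate l s).map (fun p => (p.1, f p.2)) := by
  induction l generalizing s with
  | nil => simp [PySem.List.enumerate_nil]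
  | cons a t ih => simp [PySem.List.enumerate_cons, ih]

theorem pv_getD_dp (kd : List Char) (c : Char) :
    ((PySem.List.enumerate kd).foldl (fun d p => d.modify p.2 [] (fun ps => ps ++ [p.1]))
      (PySem.Dict.empty : PySem.Dict Char (List Int))).getD c []
    = ((PySem.List.enumerate kd).filter (fun p => p.2 == c)).map (fun p => p.1) := by
  have h : ((PySem.List.enumerate kd).foldl (fun d p => d.modify p.2 [] (fun ps => ps ++ [p.1]))
      (PySem.Dict.empty : PySem.Dict Char (List Int)))
      = ((PySem.List.enumerate kd).map Prod.swap).foldl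
          (fun d p => d.modify p.1 [] (fun ps => ps ++ [p.2])) PySem.Dict.empty := by
    rw [List.foldl_map]
    rfl
  rw [h, PySem.Dict.getD_foldl_modify_append]
  simp [List.filter_map, List.map_map, Function.comp_def]

theorem pv_keys_dp (kd : List Char) :
    ((PySem.List.enumerate kd).foldl (fun d p => d.modify p.2 [] (fun ps => ps ++ [p.1]))
      (PySem.Dict.empty : PySem.Dict Char (List Int))).keys
    = PySem.Set.ofList kd := by
  rw [PySem.Dict.keys_foldl_modify_key]
  simp [PySem.List.map_snd_enumerate, PySem.Dict.keys_empty, PySem.Set.update, PySem.Set.ofList_eq_foldl]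

theorem pv_nodup_dp (kd : List Char) :
    ((PySem.List.enumerate kd).foldl (fun d p => d.modify p.2 [] (fun ps => ps ++ [p.1]))
      (PySem.Dict.empty : PySem.Dict Char (List Int))).keys.Nodup := by
  exact PySem.Dict.nodup_keys_foldl_modify_key _ _ _ _ _ (by simp [PySem.Dict.keys_empty])


-- value of one group's guarded inner count, as an unconditional countP over the group
theorem pv_gN (kd vd : List Char) (c : Char) :
    (if (((PySem.List.enumerate kd).filter (fun p => p.2 == c)).map (fun p => p.1)).length > 1 then
        ((((PySem.List.enumerate kd).filter (fun p => p.2 == c)).map (fun p => p.1)).countP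
          (fun x => decide (PySem.List.pyGetD kd x ' ' ≠ PySem.List.pyGetD vd x ' ')))
      else 0)
    = ((PySem.List.enumerate kd).filter (fun p => p.2 == c)).countP
        (fun p => decide (1 < kd.count p.2)
          && decide (PySem.List.pyGetD kd p.1 ' ' ≠ PySem.List.pyGetD vd p.1 ' ')) := by
  have hlenc : (((PySem.List.enumerate kd).filter (fun p => p.2 == c)).map (fun p => p.1)).length
      = kd.count c := by
    rw [List.length_map, ← List.countP_eq_length_filter, List.count_eq_countP]
    conv_rhs => rw [show kd = (PySem.List.enumerate kd).map (fun p => p.2) from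
      (PySem.List.map_snd_enumerate kd 0).symm]
    rw [List.countP_map]
    rfl
  by_cases h : 1 < kd.count c
  · simp only [gt_iff_lt, hlenc]
    rw [if_pos h, List.countP_map]
    apply List.countP_congr
    intro p hp
    have h2 : p.2 = c := beq_iff_eq.mp (List.mem_filter.mp hp).2
    constructor <;> intro hb <;> simp_all
  · simp only [gt_iff_lt, hlenc]
    rw [if_neg h]
    symm
    rw [List.countP_eq_zero]
    intro p hp
    have h2 : p.2 = c := beq_iff_eq.mp (List.mem_filter.mp hp).2
    simp [h2, h]

-- the flat enumerate count equals the flat zip count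
theorem pv_bridge (kd vd : List Char) (hlen : kd.length = vd.length) :
    (PySem.List.enumerate kd).countP
        (fun p => decide (1 < kd.count p.2)
          && decide (PySem.List.pyGetD kd p.1 ' ' ≠ PySem.List.pyGetD vd p.1 ' '))
    = (kd.zip vd).countP (fun x => decide ((↑(kd.count x.1) : Int) > 1 ∧ x.1 ≠ x.2)) := by
  have hE : PySem.List.enumerate kd 0
      = (PySem.List.enumerate (kd.zip vd) 0).map (fun p => (p.1, p.2.1)) := by
    rw [← pv_enumerate_map]
    rw [List.map_fst_zip (le_of_eq hlen)]
  rw [hE, List.countP_map]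
  have hcongr : ∀ p ∈ PySem.List.enumerate (kd.zip vd) 0,
      ((fun p => decide (1 < kd.count p.2)
          && decide (PySem.List.pyGetD kd p.1 ' ' ≠ PySem.List.pyGetD vd p.1 ' '))
        ∘ (fun p => (p.1, p.2.1))) p
      = true ↔ (fun x => decide ((↑(kd.count x.1) : Int) > 1 ∧ x.1 ≠ x.2)) p.2 = true := by
    intro p hp
    rcases (PySem.List.mem_enumerate_iff _ _ _).mp hp with ⟨k, hk, rfl⟩
    have hkk : k < kd.length := by
      rw [List.length_zip, hlen, min_self] at hk
      omega
    have hkv : k < vd.length := by omega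
    simp only [Function.comp_def, zero_add]
    rw [List.getElem_zip]
    simp [PySem.List.pyGetD_natCast, List.getElem?_eq_getElem hkk, List.getElem?_eq_getElem hkv,
      Nat.one_lt_cast]
  rw [List.countP_congr hcongr]
  have : (PySem.List.enumerate (kd.zip vd) 0).countP
        (fun p => (fun x => decide ((↑(kd.count x.1) : Int) > 1 ∧ x.1 ≠ x.2)) p.2)
      = ((PySem.List.enumerate (kd.zip vd) 0).map (fun p => p.2)).countP
        (fun x => decide ((↑(kd.count x.1) : Int) > 1 ∧ x.1 ≠ x.2)) := by
    rw [List.countP_map]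
    rfl
  rw [this, PySem.List.map_snd_enumerate]

-- the core: the grouped nested count equals the flat zip count
theorem pv_core (kd vd : List Char) (hlen : kd.length = vd.length) :
    (((PySem.List.enumerate kd).foldl (fun d p => d.modify p.2 [] (fun ps => ps ++ [p.1]))
      (PySem.Dict.empty : PySem.Dict Char (List Int))).items.foldl (fun count it =>
      if it.2.length > 1 then
        it.2.foldl (fun cnt pos =>
          if PySem.List.pyGetD kd pos ' ' ≠ PySem.List.pyGetD vd pos ' ' then cnt + 1 else cnt)
          count
      else count) (0 : Int))
    = (kd.zip vd).foldl (fun t p =>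
        if (kd.foldl (fun d c => d.insert c (d.getD c 0 + 1))
              (PySem.Dict.empty : PySem.Dict Char Int)).getD p.1 0 > 1 ∧ p.1 ≠ p.2
        then t + 1 else t) (0 : Int) := by
  rw [PySem.Dict.foldl_insert_getD_add_one_eq_counter, PySem.List.foldl_ite_add_one]
  simp only [PySem.Dict.getD_counter]
  rw [PySem.Dict.items_eq_map_keys _ (pv_nodup_dp kd) [], List.foldl_map, pv_keys_dp kd]
  simp only [pv_getD_dp kd, PySem.List.foldl_ite_add_one]
  have hbody : (fun (x : Int) (y : Char) =>
        if (((PySem.List.enumerate kd).filter (fun p => p.2 == y)).map (fun p => p.1)).length > 1 then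
          x + ↑((((PySem.List.enumerate kd).filter (fun p => p.2 == y)).map (fun p => p.1)).countP
                (fun x => decide (PySem.List.pyGetD kd x ' ' ≠ PySem.List.pyGetD vd x ' ')))
        else x)
      = fun x y => x + ↑(if (((PySem.List.enumerate kd).filter (fun p => p.2 == y)).map (fun p => p.1)).length > 1 then
          ((((PySem.List.enumerate kd).filter (fun p => p.2 == y)).map (fun p => p.1)).countP
                (fun x => decide (PySem.List.pyGetD kd x ' ' ≠ PySem.List.pyGetD vd x ' ')))
        else 0) := by
    funext x y
    split <;> simp
  rw [hbody, PySem.List.foldl_add]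
  simp only [zero_add]
  have hmap : List.map (fun y => (↑(if (((PySem.List.enumerate kd).filter (fun p => p.2 == y)).map (fun p => p.1)).length > 1 then
          ((((PySem.List.enumerate kd).filter (fun p => p.2 == y)).map (fun p => p.1)).countP
                (fun x => decide (PySem.List.pyGetD kd x ' ' ≠ PySem.List.pyGetD vd x ' ')))
        else 0) : Int)) (PySem.Set.ofList kd)
      = List.map Nat.cast (List.map (fun y => (if (((PySem.List.enumerate kd).filter (fun p => p.2 == y)).map (fun p => p.1)).length > 1 then
          ((((PySem.List.enumerate kd).filter (fun p => p.2 == y)).map (fun p => p.1)).countP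
                (fun x => decide (PySem.List.pyGetD kd x ' ' ≠ PySem.List.pyGetD vd x ' ')))
        else 0)) (PySem.Set.ofList kd)) := by
    rw [List.map_map]
    rfl
  rw [hmap, ← Nat.cast_list_sum]
  apply congrArg Nat.cast
  -- now a Nat identity
  have hmap2 := List.map_congr_left (l := PySem.Set.ofList kd)
    (f := fun y => (if (((PySem.List.enumerate kd).filter (fun p => p.2 == y)).map (fun p => p.1)).length > 1 then
          ((((PySem.List.enumerate kd).filter (fun p => p.2 == y)).map (fun p => p.1)).countP
                (fun x => decide (PySem.List.pyGetD kd x ' ' ≠ PySem.List.pyGetD vd x ' ')))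
        else 0))
    (g := fun c => ((PySem.List.enumerate kd).filter (fun p => p.2 == c)).countP
        (fun p => decide (1 < kd.count p.2)
          && decide (PySem.List.pyGetD kd p.1 ' ' ≠ PySem.List.pyGetD vd p.1 ' ')))
    (fun c _ => pv_gN kd vd c)
  rw [hmap2]
  rw [pv_partition_countP (fun p => p.2) _ (PySem.List.enumerate kd) (PySem.Set.ofList kd)
    (PySem.Set.nodup_ofList kd) ?hcov]
  · exact pv_bridge kd vd hlen
  · intro x hx
    rcases (PySem.List.mem_enumerate_iff _ _ _).mp hx with ⟨k, hk, rfl⟩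
    exact (PySem.Set.mem_ofList kd _).mpr (by simp)

-- ===== VERDICT (by name: the statement is the Claim_ definition above) =====
theorem count_repeating_digits_with_diff_values_spec : Claim_equal_count_repeating_digits_with_diff_values := by
  intro key value _
  simp only [Spec_count_repeating_digits_with_diff_values,
    count_repeating_digits_with_diff_values, count_repeating_digits_with_diff_values_alt]
  split_ifs with h
  · rfl
  · exact pv_core _ _ (not_ne_iff.mp h)
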